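-- pv_equiv track=rewrite | github.com/epiqc/qutrits | cirq/circuits/circuit.py | reconstruct_moments
-- ===== SOURCE A (Python) =====
-- def reconstruct_moments(mat_and_qs_list):
--     mat_and_qs_list = list(mat_and_qs_list)
--     moments = []
--     while len(mat_and_qs_list) > 0:
--         blocked_qs = set()
--         moment = []
--         mat_and_qs_list_next = []
--         for mat, qs in mat_and_qs_list:
--             if any([q in blocked_qs for q in qs]):
--                 blocked_qs.update(qs)  # even if we're not adding, we want to block dependent gates
--                 mat_and_qs_list_next.append((mat, qs))
--             else:
--                 moment.append((mat, qs))
--                 blocked_qs.update(qs)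
--         mat_and_qs_list = mat_and_qs_list_next
--         moments.append(moment)
--     return moments
-- ===== SOURCE B (Python) =====
-- def reconstruct_moments(mat_and_qs_list):
--     # Single-pass ASAP scheduling: each gate goes into moment max(next-free of its qubits).
--     moments = []
--     avail = {}
--     for mat, qs in mat_and_qs_list:
--         idx = 0
--         for q in qs:
--             a = avail.get(q, 0)
--             if a > idx:
--                 idx = a
--         if idx == len(moments):
--             moments.append([(mat, qs)])
--         else:
--             moments[idx].append((mat, qs))
--         for q in qs:
--             avail[q] = idx + 1
--     return moments
-- ===== Notes on version B (the rewrite author's own statement) =====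
-- stated objective: faster
-- what changed: Replaces A's repeated passes over the remaining gate list (one pass per moment, with a blocked-qubit set) by a single left-to-right pass that keeps a dict qubit -> next-free moment index and appends each gate directly to the moment given by the max availability of its qubits.
import Mathlib
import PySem

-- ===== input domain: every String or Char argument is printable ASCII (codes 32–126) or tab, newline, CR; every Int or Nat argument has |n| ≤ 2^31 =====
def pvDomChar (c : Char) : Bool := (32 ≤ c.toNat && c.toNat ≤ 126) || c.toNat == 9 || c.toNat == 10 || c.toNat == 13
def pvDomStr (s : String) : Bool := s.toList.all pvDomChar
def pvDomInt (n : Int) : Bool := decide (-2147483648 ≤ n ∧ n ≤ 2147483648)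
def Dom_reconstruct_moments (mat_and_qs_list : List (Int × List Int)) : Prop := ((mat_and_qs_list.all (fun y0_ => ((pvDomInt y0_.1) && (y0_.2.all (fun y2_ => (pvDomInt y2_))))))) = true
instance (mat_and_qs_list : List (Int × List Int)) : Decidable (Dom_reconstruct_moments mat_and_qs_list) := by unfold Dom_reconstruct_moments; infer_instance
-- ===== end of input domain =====

-- B replaces A's repeated passes over the remaining gates by a single pass with a
-- qubit -> next-free-moment dictionary (asymptotically faster scheduling, same output).


-- ===== PORT A =====
-- one pass of A's while-loop body: returns (moment, mat_and_qs_list_next)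
def pvPassA : List (Int × List Int) → PySem.Set Int → List (Int × List Int) × List (Int × List Int)
  | [], _ => ([], [])
  | (mat, qs) :: tl, blocked =>
    if qs.any (fun q => PySem.Set.contains blocked q) then
      let p := pvPassA tl (PySem.Set.update blocked qs)
      (p.1, (mat, qs) :: p.2)
    else
      let p := pvPassA tl (PySem.Set.update blocked qs)
      ((mat, qs) :: p.1, p.2)

theorem pvPassA_snd_length : ∀ (L : List (Int × List Int)) (b : PySem.Set Int),
    (pvPassA L b).2.length ≤ L.length := by
  intro L
  induction L with
  | nil => intro b; simp [pvPassA]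
  | cons g tl ih =>
    intro b
    obtain ⟨mat, qs⟩ := g
    by_cases h : qs.any (fun q => PySem.Set.contains b q)
    · simp only [pvPassA, if_pos h, List.length_cons]
      exact Nat.succ_le_succ (ih _)
    · simp only [pvPassA, if_neg h, List.length_cons]
      exact Nat.le_succ_of_le (ih _)

theorem pvPassA_cons_empty (mat : Int) (qs : List Int) (tl : List (Int × List Int)) :
    pvPassA ((mat, qs) :: tl) PySem.Set.empty =
      ((mat, qs) :: (pvPassA tl (PySem.Set.update PySem.Set.empty qs)).1,
       (pvPassA tl (PySem.Set.update PySem.Set.empty qs)).2) := by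
  simp [pvPassA, PySem.Set.empty]

-- A's while-loop: peel one moment per pass
def pvLoopA : List (Int × List Int) → List (List (Int × List Int))
  | [] => []
  | (mat, qs) :: tl =>
    let p := pvPassA ((mat, qs) :: tl) PySem.Set.empty
    p.1 :: pvLoopA p.2
termination_by L => L.length
decreasing_by
  have h := pvPassA_cons_empty mat qs tl
  have h2 := pvPassA_snd_length tl (PySem.Set.update PySem.Set.empty qs)
  simp only [h]
  simpa using Nat.lt_succ_of_le h2

def reconstruct_moments (mat_and_qs_list : List (Int × List Int)) : List (List (Int × List Int)) :=
  pvLoopA mat_and_qs_list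

-- ===== PORT B =====
-- moments[i].append(g), appending a fresh moment when i = len(moments)
def pvAppendAt {α : Type} : List (List α) → Nat → α → List (List α)
  | [], 0, g => [[g]]
  | [], n+1, g => [] :: pvAppendAt [] n g
  | m :: ms, 0, g => (m ++ [g]) :: ms
  | m :: ms, n+1, g => m :: pvAppendAt ms n g

-- one iteration of B's loop over the gates, state = (moments, avail)
def pvStepB (st : List (List (Int × List Int)) × PySem.Dict Int Nat) (g : Int × List Int) :
    List (List (Int × List Int)) × PySem.Dict Int Nat :=
  let i := g.2.foldl (fun a q => max a (st.2.getD q 0)) 0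
  (pvAppendAt st.1 i g, g.2.foldl (fun d q => d.insert q (i + 1)) st.2)

def reconstruct_moments_alt (mat_and_qs_list : List (Int × List Int)) : List (List (Int × List Int)) :=
  (mat_and_qs_list.foldl pvStepB ([], PySem.Dict.empty)).1

-- ===== PRECONDITION & SPEC =====
def Spec_reconstruct_moments (mat_and_qs_list : List (Int × List Int)) (out : List (List (Int × List Int))) : Prop := out = reconstruct_moments_alt mat_and_qs_list
instance (mat_and_qs_list : List (Int × List Int)) (out : List (List (Int × List Int))) : Decidable (Spec_reconstruct_moments mat_and_qs_list out) := by unfold Spec_reconstruct_moments; infer_instance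

-- ===== CLAIM (what is proved, stated in full; the proofs are below) =====
def Claim_equal_reconstruct_moments : Prop := ∀ (mat_and_qs_list : List (Int × List Int)), Dom_reconstruct_moments mat_and_qs_list → Spec_reconstruct_moments mat_and_qs_list (reconstruct_moments mat_and_qs_list)

-- ===== LEMMAS AND PROOFS =====

-- proof-side middle spec: schedule with an abstract availability function
def pvLvl (a : Int → Nat) (qs : List Int) : Nat := qs.foldl (fun x q => max x (a q)) 0

def pvUpd (a : Int → Nat) (qs : List Int) (v : Nat) : Int → Nat := fun q => if q ∈ qs then v else a q

def pvPrependAt {α : Type} : List (List α) → Nat → α → List (List α)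
  | [], 0, g => [[g]]
  | [], n+1, g => [] :: pvPrependAt [] n g
  | m :: ms, 0, g => (g :: m) :: ms
  | m :: ms, n+1, g => m :: pvPrependAt ms n g

def pvS : List (Int × List Int) → (Int → Nat) → List (List (Int × List Int))
  | [], _ => []
  | (mat, qs) :: tl, a =>
    pvPrependAt (pvS tl (pvUpd a qs (pvLvl a qs + 1))) (pvLvl a qs) (mat, qs)

def pvMerge {α : Type} : List (List α) → List (List α) → List (List α)
  | [], s => s
  | ms, [] => ms
  | m :: ms, s0 :: s => (m ++ s0) :: pvMerge ms s

def pvConsM {α : Type} : List α → List (List α) → List (List α)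
  | [], [] => []
  | mo, s => mo :: s

theorem pvMerge_nil_right {α : Type} (ms : List (List α)) : pvMerge ms [] = ms := by
  cases ms <;> rfl

theorem pvPrependAt_ne_nil {α : Type} (s : List (List α)) (i : Nat) (g : α) :
    pvPrependAt s i g ≠ [] := by
  cases s <;> cases i <;> simp [pvPrependAt]

theorem pvConsM_ne_nil {α : Type} (mo : List α) (s : List (List α)) (h : s ≠ []) :
    pvConsM mo s = mo :: s := by
  cases mo <;> cases s <;> simp_all [pvConsM]

theorem pvConsM_cons {α : Type} (x : α) (mo : List α) (s : List (List α)) :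
    pvConsM (x :: mo) s = (x :: mo) :: s := by
  cases s <;> rfl

theorem pvPrependAt_consM_succ {α : Type} (mo : List α) (s : List (List α)) (j : Nat) (g : α) :
    pvPrependAt (pvConsM mo s) (j + 1) g = mo :: pvPrependAt s j g := by
  cases mo <;> cases s <;> rfl

theorem pvPrependAt_consM_zero {α : Type} (mo : List α) (s : List (List α)) (g : α) :
    pvPrependAt (pvConsM mo s) 0 g = (g :: mo) :: s := by
  cases mo <;> cases s <;> rfl

theorem pvAppendAt_nil {α : Type} : ∀ (n : Nat) (g : α),
    pvAppendAt ([] : List (List α)) n g = pvPrependAt [] n g := by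
  intro n
  induction n with
  | zero => intro g; rfl
  | succ n ih => intro g; simp [pvAppendAt, pvPrependAt, ih]

theorem pvMerge_appendAt {α : Type} : ∀ (i : Nat) (ms s : List (List α)) (g : α),
    pvMerge (pvAppendAt ms i g) s = pvMerge ms (pvPrependAt s i g) := by
  intro i
  induction i with
  | zero =>
    intro ms s g
    cases ms <;> cases s <;> simp [pvAppendAt, pvPrependAt, pvMerge, pvMerge_nil_right]
  | succ n ih =>
    intro ms s g
    cases ms with
    | nil =>
      cases s with
      | nil => simp [pvAppendAt, pvPrependAt, pvMerge, pvAppendAt_nil]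
      | cons s0 s' =>
        have h := ih [] s' g
        simp [pvAppendAt, pvPrependAt, pvMerge, h]
    | cons m ms' =>
      cases s with
      | nil =>
        have h := ih ms' [] g
        simp only [pvMerge_nil_right] at h
        simp [pvAppendAt, pvPrependAt, pvMerge, h]
      | cons s0 s' => simp [pvAppendAt, pvPrependAt, pvMerge, ih]

-- foldl-max facts
theorem pvFoldlMax_init_le (a : Int → Nat) : ∀ (qs : List Int) (x : Nat),
    x ≤ qs.foldl (fun r q => max r (a q)) x := by
  intro qs
  induction qs with
  | nil => intro x; simp
  | cons q qs ih =>
    intro x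
    exact le_trans (le_max_left x (a q)) (ih _)

theorem pvFoldlMax_mem_le (a : Int → Nat) : ∀ (qs : List Int) (x : Nat) (q : Int), q ∈ qs →
    a q ≤ qs.foldl (fun r q => max r (a q)) x := by
  intro qs
  induction qs with
  | nil => intro x q h; simp at h
  | cons p qs ih =>
    intro x q h
    rcases List.mem_cons.mp h with h | h
    · subst h
      exact le_trans (le_max_right x (a q)) (pvFoldlMax_init_le a qs _)
    · exact ih _ q h

theorem pvLvl_pos (a : Int → Nat) (qs : List Int) (q : Int) (hq : q ∈ qs) (ha : 1 ≤ a q) :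
    1 ≤ pvLvl a qs :=
  le_trans ha (pvFoldlMax_mem_le a qs 0 q hq)

theorem pvFoldlMax_zero (a : Int → Nat) : ∀ (qs : List Int) (x : Nat), (∀ q ∈ qs, a q = 0) →
    qs.foldl (fun r q => max r (a q)) x = x := by
  intro qs
  induction qs with
  | nil => intro x _; rfl
  | cons p qs ih =>
    intro x h
    have hp : a p = 0 := h p (List.mem_cons_self ..)
    simp only [List.foldl_cons, hp, Nat.max_zero]
    exact ih x fun q hq => h q (List.mem_cons_of_mem _ hq)

theorem pvLvl_eq_zero (a : Int → Nat) (qs : List Int) (h : ∀ q ∈ qs, a q = 0) :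
    pvLvl a qs = 0 := pvFoldlMax_zero a qs 0 h

theorem pvFoldlMax_sub (a : Int → Nat) : ∀ (qs : List Int) (x : Nat),
    qs.foldl (fun r q => max r (a q - 1)) (x - 1) = (qs.foldl (fun r q => max r (a q)) x) - 1 := by
  intro qs
  induction qs with
  | nil => intro x; rfl
  | cons p qs ih =>
    intro x
    simp only [List.foldl_cons]
    have : max (x - 1) (a p - 1) = max x (a p) - 1 := by omega
    rw [this, ih]

theorem pvLvl_sub (a : Int → Nat) (qs : List Int) :
    pvLvl (fun q => a q - 1) qs = pvLvl a qs - 1 := pvFoldlMax_sub a qs 0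

-- dict: getD after a foldl of inserts with a constant value
theorem pvGetD_foldl_insert (v : Nat) : ∀ (qs : List Int) (d : PySem.Dict Int Nat) (q : Int),
    ((qs.foldl (fun d x => d.insert x v) d).getD q 0) = if q ∈ qs then v else d.getD q 0 := by
  intro qs
  induction qs with
  | nil => intro d q; simp
  | cons p qs ih =>
    intro d q
    simp only [List.foldl_cons, ih, PySem.Dict.getD_insert]
    by_cases hq : q ∈ qs <;> by_cases hp : q = p <;> simp [hq, hp]

-- THE PASS LEMMA: one pass of A peels exactly moment 0 of the schedule
theorem pvPass_S : ∀ (L : List (Int × List Int)) (b : PySem.Set Int) (a a' : Int → Nat),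
    (∀ q, q ∈ b ↔ 1 ≤ a q) → (a' = fun q => a q - 1) →
    pvS L a = pvConsM (pvPassA L b).1 (pvS (pvPassA L b).2 a') := by
  intro L
  induction L with
  | nil => intro b a a' _ _; rfl
  | cons g tl ih =>
    intro b a a' hb ha'
    obtain ⟨mat, qs⟩ := g
    subst ha'
    set i := pvLvl a qs with hi
    have hrel : ∀ q, q ∈ PySem.Set.update b qs ↔ 1 ≤ pvUpd a qs (i + 1) q := by
      intro q
      rw [PySem.Set.mem_update]
      unfold pvUpd
      by_cases hq : q ∈ qs
      · simp [hq]
      · simp [hq, hb q]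
    have hIH := ih (PySem.Set.update b qs) (pvUpd a qs (i + 1))
      (fun q => pvUpd a qs (i + 1) q - 1) hrel rfl
    by_cases hc : qs.any (fun q => PySem.Set.contains b q)
    · -- blocked: gate deferred to the next pass
      obtain ⟨q0, hq0mem, hq0⟩ := List.any_eq_true.mp hc
      have hq0b : q0 ∈ b := by simpa using hq0
      have hipos : 1 ≤ i := pvLvl_pos a qs q0 hq0mem ((hb q0).mp hq0b)
      obtain ⟨j, hj⟩ : ∃ j, i = j + 1 := ⟨i - 1, by omega⟩
      have hpass : pvPassA ((mat, qs) :: tl) b =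
          ((pvPassA tl (PySem.Set.update b qs)).1,
           (mat, qs) :: (pvPassA tl (PySem.Set.update b qs)).2) := by
        simp [pvPassA]
        exact ⟨q0, hq0mem, hq0b⟩
      rw [hpass]
      set mo := (pvPassA tl (PySem.Set.update b qs)).1
      set re := (pvPassA tl (PySem.Set.update b qs)).2
      -- RHS schedule of the deferred gate
      have hlv' : pvLvl (fun q => a q - 1) qs = j := by rw [pvLvl_sub, ← hi, hj]; omega
      have hupd : pvUpd (fun q => a q - 1) qs (j + 1) = fun q => pvUpd a qs (i + 1) q - 1 := by
        funext q
        unfold pvUpd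
        by_cases hq : q ∈ qs <;> simp [hq, hj]
      have hSg : pvS ((mat, qs) :: re) (fun q => a q - 1) =
          pvPrependAt (pvS re (fun q => pvUpd a qs (i + 1) q - 1)) j (mat, qs) := by
        simp only [pvS, hlv', hupd]
      rw [hSg, pvConsM_ne_nil mo _ (pvPrependAt_ne_nil _ _ _)]
      show pvPrependAt (pvS tl (pvUpd a qs (i + 1))) i (mat, qs) = _
      rw [hIH, hj, pvPrependAt_consM_succ]
    · -- unblocked: gate placed into this moment
      have hz : ∀ q ∈ qs, a q = 0 := by
        intro q hq
        have : ¬ q ∈ b := by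
          intro hmem
          exact hc (List.any_eq_true.mpr ⟨q, hq, by simpa using hmem⟩)
        have := (hb q).not.mp this
        omega
      have hi0 : i = 0 := pvLvl_eq_zero a qs hz
      have hpass : pvPassA ((mat, qs) :: tl) b =
          ((mat, qs) :: (pvPassA tl (PySem.Set.update b qs)).1,
           (pvPassA tl (PySem.Set.update b qs)).2) := by
        simp [pvPassA]
        intro z hz hmem
        exact hc (List.any_eq_true.mpr ⟨z, hz, by simpa using hmem⟩)
      rw [hpass]
      set mo := (pvPassA tl (PySem.Set.update b qs)).1
      set re := (pvPassA tl (PySem.Set.update b qs)).2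
      have haeq : (fun q => pvUpd a qs (i + 1) q - 1) = fun q => a q - 1 := by
        funext q
        unfold pvUpd
        by_cases hq : q ∈ qs
        · simp [hq, hi0, hz q hq]
        · simp [hq]
      rw [pvConsM_cons]
      show pvPrependAt (pvS tl (pvUpd a qs (i + 1))) i (mat, qs) = _
      rw [hIH, haeq, hi0, pvPrependAt_consM_zero]

-- A's loop equals the schedule from the all-zero availability
theorem pvLoopA_len : ∀ (n : Nat) (L : List (Int × List Int)), L.length ≤ n →
    pvLoopA L = pvS L (fun _ => 0) := by
  intro n
  induction n with
  | zero =>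
    intro L h
    have hL : L = [] := List.eq_nil_of_length_eq_zero (Nat.le_zero.mp h)
    subst hL
    rw [pvLoopA]
    rfl
  | succ n ihn =>
    intro L h
    cases L with
    | nil => rw [pvLoopA]; rfl
    | cons g tl =>
      obtain ⟨mat, qs⟩ := g
      have hb : ∀ q : Int, q ∈ (PySem.Set.empty : PySem.Set Int) ↔
          1 ≤ (fun _ : Int => (0 : Nat)) q := by
        intro q
        simp [PySem.Set.empty]
      have hpass := pvPass_S ((mat, qs) :: tl) PySem.Set.empty (fun _ => 0) (fun _ => 0) hb rfl
      have hlen : (pvPassA tl (PySem.Set.update PySem.Set.empty qs)).2.length ≤ n :=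
        le_trans (pvPassA_snd_length tl _) (by simpa using h)
      rw [pvLoopA, hpass, pvPassA_cons_empty, pvConsM_cons]
      rw [ihn _ hlen]

theorem pvLoopA_eq (L : List (Int × List Int)) : pvLoopA L = pvS L (fun _ => 0) :=
  pvLoopA_len L.length L le_rfl

-- B's fold equals the schedule, merged onto the moments accumulated so far
theorem pvFoldB_eq : ∀ (L : List (Int × List Int)) (ms : List (List (Int × List Int)))
    (d : PySem.Dict Int Nat),
    (L.foldl pvStepB (ms, d)).1 = pvMerge ms (pvS L (fun q => d.getD q 0)) := by
  intro L
  induction L with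
  | nil => intro ms d; simp [pvS, pvMerge_nil_right]
  | cons g tl ih =>
    intro ms d
    obtain ⟨mat, qs⟩ := g
    set i := pvLvl (fun q => d.getD q 0) qs with hi
    have hstep : pvStepB (ms, d) (mat, qs) =
        (pvAppendAt ms i (mat, qs), qs.foldl (fun d q => d.insert q (i + 1)) d) := rfl
    have hdict : (fun q => (qs.foldl (fun d q => d.insert q (i + 1)) d).getD q 0) =
        pvUpd (fun q => d.getD q 0) qs (i + 1) := by
      funext q
      rw [pvGetD_foldl_insert]
      unfold pvUpd
      by_cases hq : q ∈ qs <;> simp [hq]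
    rw [List.foldl_cons, hstep, ih, hdict, pvMerge_appendAt]
    rfl

-- ===== VERDICT (by name: the statement is the Claim_ definition above) =====
theorem reconstruct_moments_spec : Claim_equal_reconstruct_moments := by
  intro L _
  unfold Spec_reconstruct_moments reconstruct_moments reconstruct_moments_alt
  rw [pvFoldB_eq, pvLoopA_eq]
  have : (fun q : Int => (PySem.Dict.empty : PySem.Dict Int Nat).getD q 0) = fun _ => 0 := by
    funext q
    simp
  rw [this]
  rfl
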